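-- pv_equiv track=rewrite | github.com/Poiro-cat/pycongruence | utils.py | power_mod_quadratic_field
-- ===== SOURCE A (Python) =====
-- def power_mod_quadratic_field(a:int, b:int, D:int, n:int, N:int):
--     assert n>=0, 'Power degree n should be NOT NEGATIVE'
--     assert N>0, 'Modulus integer N should be POSITIVE'
--     u,v = 1,0
--     while True:
--         if n % 2 > 0: u,v = (u*a+v*b*D)%N, (u*b+v*a)%N
--         n //= 2
--         if n == 0: break
--         a,b = (a*a+b*b*D)%N, (2*a*b)%N
--     return u,v
-- ===== SOURCE B (Python) =====
-- def power_mod_quadratic_field(a: int, b: int, D: int, n: int, N: int):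
--     assert n >= 0, 'Power degree n should be NOT NEGATIVE'
--     assert N > 0, 'Modulus integer N should be POSITIVE'
--     # Left-to-right (MSB-first) square-and-multiply: square the ACCUMULATOR,
--     # multiply by the fixed base (a, b) when the current bit is 1.
--     u, v = 1, 0
--     for i in range(n.bit_length() - 1, -1, -1):
--         u, v = (u*u + v*v*D) % N, (2*u*v) % N
--         if (n >> i) & 1:
--             u, v = (u*a + v*b*D) % N, (u*b + v*a) % N
--     return u, v
-- ===== Notes on version B (the rewrite author's own statement) =====
-- stated objective: alternative
-- what changed: Replaced A's right-to-left binary exponentiation (which repeatedly squares the mutable base (a,b) and multiplies the accumulator on a set low bit) by left-to-right MSB-first square-and-multiply that squares the accumulator each step and multiplies by the fixed, unmodified base when the bit is 1.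
import Mathlib
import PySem

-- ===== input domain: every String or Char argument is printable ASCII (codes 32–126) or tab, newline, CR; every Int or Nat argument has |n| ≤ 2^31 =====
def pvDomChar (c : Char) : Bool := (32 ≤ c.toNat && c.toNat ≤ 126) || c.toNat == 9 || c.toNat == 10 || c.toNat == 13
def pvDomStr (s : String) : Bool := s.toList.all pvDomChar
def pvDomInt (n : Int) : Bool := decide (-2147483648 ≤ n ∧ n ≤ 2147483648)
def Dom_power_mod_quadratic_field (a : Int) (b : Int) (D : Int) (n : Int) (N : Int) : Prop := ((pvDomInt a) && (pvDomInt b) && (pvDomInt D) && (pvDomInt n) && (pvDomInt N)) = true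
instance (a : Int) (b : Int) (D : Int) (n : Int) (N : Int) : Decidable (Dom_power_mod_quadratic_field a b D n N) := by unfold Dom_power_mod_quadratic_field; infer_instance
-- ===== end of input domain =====

-- B replaces A's right-to-left binary exponentiation (which squares the BASE) by
-- left-to-right MSB-first square-and-multiply (which squares the ACCUMULATOR and
-- keeps the base fixed); objective: alternative decomposition, same cost.

-- ===== PORT A =====
-- A's `while True` loop; n is carried as a Nat because the assert `n >= 0`
-- (reflected in Pre_) guarantees non-negativity, so Python's n % 2 and n //= 2
-- coincide with Nat mod / div.
def pvQLoopA (D N : Int) (u v a b : Int) (n : Nat) : Int × Int :=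
  let uv : Int × Int :=
    if n % 2 > 0 then (PySem.Int.mod (u*a + v*b*D) N, PySem.Int.mod (u*b + v*a) N)
    else (u, v)
  if _h : n / 2 = 0 then uv
  else pvQLoopA D N uv.1 uv.2 (PySem.Int.mod (a*a + b*b*D) N) (PySem.Int.mod (2*a*b) N) (n / 2)
termination_by n
decreasing_by omega

def power_mod_quadratic_field (a : Int) (b : Int) (D : Int) (n : Int) (N : Int) : Int × Int :=
  if 0 ≤ n ∧ 0 < N then pvQLoopA D N 1 0 a b n.toNat else (0, 0)

-- ===== PORT B =====
-- the bits of n, most significant first ([] for 0): Source B's tests (n >> i) & 1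
-- for i = bit_length-1 .. 0.
def pvBits (m : Nat) : List Bool :=
  if _h : m = 0 then []
  else pvBits (m / 2) ++ [m % 2 == 1]
termination_by m
decreasing_by omega

-- one iteration of Source B's loop body: square the accumulator, then multiply by
-- the fixed base (a, b) when the bit is set.
def pvStepB (a b D N : Int) (uv : Int × Int) (bit : Bool) : Int × Int :=
  let s : Int × Int := (PySem.Int.mod (uv.1*uv.1 + uv.2*uv.2*D) N, PySem.Int.mod (2*uv.1*uv.2) N)
  if bit then (PySem.Int.mod (s.1*a + s.2*b*D) N, PySem.Int.mod (s.1*b + s.2*a) N) else s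

def power_mod_quadratic_field_alt (a : Int) (b : Int) (D : Int) (n : Int) (N : Int) : Int × Int :=
  if 0 ≤ n ∧ 0 < N then (pvBits n.toNat).foldl (pvStepB a b D N) (1, 0) else (0, 0)

-- ===== PRECONDITION & SPEC =====
-- Pre_ excludes exactly the inputs on which A's asserts raise AssertionError (n < 0 or N ≤ 0).
def Pre_power_mod_quadratic_field (a : Int) (b : Int) (D : Int) (n : Int) (N : Int) : Prop :=
  0 ≤ n ∧ 0 < N
instance (a : Int) (b : Int) (D : Int) (n : Int) (N : Int) : Decidable (Pre_power_mod_quadratic_field a b D n N) := by unfold Pre_power_mod_quadratic_field; infer_instance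

def pvWitness_power_mod_quadratic_field : Int × Int × Int × Int × Int := (2, 3, 5, 6, 7)

def Spec_power_mod_quadratic_field (a : Int) (b : Int) (D : Int) (n : Int) (N : Int) (out : Int × Int) : Prop := out = power_mod_quadratic_field_alt a b D n N
instance (a : Int) (b : Int) (D : Int) (n : Int) (N : Int) (out : Int × Int) : Decidable (Spec_power_mod_quadratic_field a b D n N out) := by unfold Spec_power_mod_quadratic_field; infer_instance

-- ===== CLAIM (what is proved, stated in full; the proofs are below) =====
def Claim_equal_power_mod_quadratic_field : Prop := ∀ (a : Int) (b : Int) (D : Int) (n : Int) (N : Int), Dom_power_mod_quadratic_field a b D n N → Pre_power_mod_quadratic_field a b D n N → Spec_power_mod_quadratic_field a b D n N (power_mod_quadratic_field a b D n N)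

-- ===== LEMMAS AND PROOFS =====

-- multiplication in Z[√D]: (p1 + p2√D)(q1 + q2√D)
def qmul (D : Int) (p q : Int × Int) : Int × Int :=
  (p.1*q.1 + p.2*q.2*D, p.1*q.2 + p.2*q.1)

def qpow (D : Int) (p : Int × Int) : Nat → Int × Int
  | 0 => (1, 0)
  | k+1 => qmul D p (qpow D p k)

-- componentwise congruence mod N
def PEq (N : Int) (p q : Int × Int) : Prop := p.1 ≡ q.1 [ZMOD N] ∧ p.2 ≡ q.2 [ZMOD N]

-- componentwise "already reduced mod N"
def Red (N : Int) (p : Int × Int) : Prop := p.1 % N = p.1 ∧ p.2 % N = p.2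

theorem peq_refl (N : Int) (p : Int × Int) : PEq N p p := ⟨Int.ModEq.refl _, Int.ModEq.refl _⟩

theorem peq_trans {N : Int} {p q r : Int × Int} (h1 : PEq N p q) (h2 : PEq N q r) : PEq N p r :=
  ⟨h1.1.trans h2.1, h1.2.trans h2.2⟩

theorem peq_of_eq {N : Int} {p q : Int × Int} (h : p = q) : PEq N p q := h ▸ peq_refl N p

theorem mod_peq (N : Int) (x y : Int) : PEq N (x % N, y % N) (x, y) :=
  ⟨Int.emod_emod_of_dvd x dvd_rfl, Int.emod_emod_of_dvd y dvd_rfl⟩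

theorem red_mod (N : Int) (x y : Int) : Red N (x % N, y % N) :=
  ⟨Int.emod_emod_of_dvd x dvd_rfl, Int.emod_emod_of_dvd y dvd_rfl⟩

theorem qmul_congr {N D : Int} {p p' q q' : Int × Int} (h1 : PEq N p p') (h2 : PEq N q q') :
    PEq N (qmul D p q) (qmul D p' q') :=
  ⟨(h1.1.mul h2.1).add ((h1.2.mul h2.2).mul (Int.ModEq.refl D)),
   (h1.1.mul h2.2).add (h1.2.mul h2.1)⟩

theorem qmul_comm (D : Int) (p q : Int × Int) : qmul D p q = qmul D q p := by
  simp only [qmul, Prod.mk.injEq]; constructor <;> ring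

theorem qmul_assoc (D : Int) (p q r : Int × Int) :
    qmul D (qmul D p q) r = qmul D p (qmul D q r) := by
  simp only [qmul, Prod.mk.injEq]; constructor <;> ring

theorem qmul_one_left (D : Int) (q : Int × Int) : qmul D (1, 0) q = q := by
  simp [qmul]

theorem qpow_qmul_self (D : Int) (p : Int × Int) (k : Nat) :
    qpow D (qmul D p p) k = qpow D p (k + k) := by
  induction k with
  | zero => rfl
  | succ k ih =>
      rw [qpow, ih, show k + 1 + (k + 1) = (k + k) + 1 + 1 by omega, qpow, qpow]
      exact qmul_assoc D p p (qpow D p (k + k))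

theorem qpow_add (D : Int) (p : Int × Int) (i j : Nat) :
    qpow D p (i + j) = qmul D (qpow D p i) (qpow D p j) := by
  induction i with
  | zero => simp [qpow, qmul_one_left]
  | succ i ih =>
      rw [show i + 1 + j = (i + j) + 1 from by omega, qpow, ih, qpow, qmul_assoc]

theorem qpow_congr {N : Int} (D : Int) {p q : Int × Int} (h : PEq N p q) (k : Nat) :
    PEq N (qpow D p k) (qpow D q k) := by
  induction k with
  | zero => exact peq_refl N _
  | succ k ih => exact qmul_congr h ih

-- A's loop computes (u,v) · (a,b)^n mod N, reduced, for n ≥ 1.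
theorem qloopA_spec (D N : Int) (hN : 0 < N) :
    ∀ n : Nat, 1 ≤ n → ∀ u v a b : Int,
      PEq N (pvQLoopA D N u v a b n) (qmul D (u, v) (qpow D (a, b) n)) ∧
      Red N (pvQLoopA D N u v a b n) := by
  intro n
  induction n using Nat.strong_induction_on with
  | _ n IH =>
    intro hn u v a b
    rw [pvQLoopA]
    simp only [PySem.Int.mod_eq_emod_of_pos hN]
    by_cases h2 : n / 2 = 0
    · -- n = 1: the bit fires, then the loop breaks
      have hn1 : n = 1 := by omega
      subst hn1
      simp only [h2, dite_true, show (1 : Nat) % 2 > 0 from by decide, if_true]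
      constructor
      · refine peq_trans (mod_peq N _ _) (peq_of_eq ?_)
        simp only [qpow, qmul, Prod.mk.injEq]; constructor <;> ring
      · exact red_mod N _ _
    · -- n ≥ 2: one loop iteration, then the recursive call
      simp only [h2, dite_false]
      set uv : Int × Int :=
        if n % 2 > 0 then ((u*a + v*b*D) % N, (u*b + v*a) % N) else (u, v) with huv
      have hrec := IH (n / 2) (by omega) (by omega) uv.1 uv.2
        ((a*a + b*b*D) % N) ((2*a*b) % N)
      refine ⟨peq_trans hrec.1 ?_, hrec.2⟩
      have hab : PEq N (((a*a + b*b*D) % N), ((2*a*b) % N)) (qmul D (a, b) (a, b)) := by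
        refine peq_trans (mod_peq N _ _) ?_
        refine ⟨Int.ModEq.refl _, ?_⟩
        have e : (qmul D (a, b) (a, b)).2 = 2*a*b := by simp [qmul]; ring
        rw [e]
      have hpow : PEq N (qpow D (((a*a + b*b*D) % N), ((2*a*b) % N)) (n / 2))
          (qpow D (a, b) (n / 2 + n / 2)) :=
        peq_trans (qpow_congr D hab (n / 2)) (peq_of_eq (qpow_qmul_self D (a, b) (n / 2)))
      by_cases ho : n % 2 > 0
      · have huv' : uv = ((u*a + v*b*D) % N, (u*b + v*a) % N) := by rw [huv, if_pos ho]
        rw [huv']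
        refine peq_trans (qmul_congr (mod_peq N _ _) hpow) (peq_of_eq ?_)
        have h1 : ((u*a + v*b*D), (u*b + v*a)) = qmul D (u, v) (a, b) := rfl
        rw [h1, qmul_assoc]
        congr 1
        rw [show qmul D (a, b) (qpow D (a, b) (n / 2 + n / 2))
            = qpow D (a, b) (n / 2 + n / 2 + 1) from rfl,
          show n / 2 + n / 2 + 1 = n from by omega]
      · have huv' : uv = (u, v) := by rw [huv, if_neg ho]
        rw [huv']
        refine peq_trans (qmul_congr (peq_refl N (u, v)) hpow) (peq_of_eq ?_)
        rw [show n / 2 + n / 2 = n from by omega]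

-- one B step: square the accumulator, multiply by the base when the bit is set
theorem stepB_spec (a b D N : Int) (hN : 0 < N) (uv p : Int × Int) (bit : Bool)
    (h : PEq N uv p) :
    PEq N (pvStepB a b D N uv bit)
      (if bit then qmul D (a, b) (qmul D p p) else qmul D p p) ∧
    Red N (pvStepB a b D N uv bit) := by
  unfold pvStepB
  simp only [PySem.Int.mod_eq_emod_of_pos hN]
  have hsq : PEq N ((uv.1*uv.1 + uv.2*uv.2*D) % N, (2*uv.1*uv.2) % N) (qmul D p p) := by
    refine peq_trans (mod_peq N _ _) ?_
    exact ⟨(h.1.mul h.1).add ((h.2.mul h.2).mul (Int.ModEq.refl D)),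
      by have : (p.1*p.2 + p.2*p.1 : Int) = 2*p.1*p.2 := by ring
         rw [show qmul D p p = (p.1*p.1 + p.2*p.2*D, p.1*p.2 + p.2*p.1) from rfl]
         show (2*uv.1*uv.2 : Int) ≡ p.1*p.2 + p.2*p.1 [ZMOD N]
         rw [this]
         exact ((Int.ModEq.refl 2).mul h.1).mul h.2⟩
  cases bit with
  | false =>
      simp only [if_false, Bool.false_eq_true]
      exact ⟨hsq, red_mod N _ _⟩
  | true =>
      simp only [if_true]
      refine ⟨peq_trans (mod_peq N _ _) ?_, red_mod N _ _⟩
      have h1 : (((uv.1*uv.1 + uv.2*uv.2*D) % N)*a + ((2*uv.1*uv.2) % N)*b*D,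
                 ((uv.1*uv.1 + uv.2*uv.2*D) % N)*b + ((2*uv.1*uv.2) % N)*a)
          = qmul D ((uv.1*uv.1 + uv.2*uv.2*D) % N, (2*uv.1*uv.2) % N) (a, b) := rfl
      rw [h1]
      refine peq_trans (qmul_congr hsq (peq_refl N (a, b))) (peq_of_eq ?_)
      rw [qmul_comm]

-- B's fold computes (a,b)^m mod N, reduced, for m ≥ 1.
theorem qfoldB_spec (a b D N : Int) (hN : 0 < N) :
    ∀ m : Nat, 1 ≤ m →
      PEq N ((pvBits m).foldl (pvStepB a b D N) (1, 0)) (qpow D (a, b) m) ∧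
      Red N ((pvBits m).foldl (pvStepB a b D N) (1, 0)) := by
  intro m
  induction m using Nat.strong_induction_on with
  | _ m IH =>
    intro hm
    rw [pvBits]
    simp only [show ¬ m = 0 from by omega, dite_false, List.foldl_append,
      List.foldl_cons, List.foldl_nil]
    by_cases h2 : m / 2 = 0
    · -- m = 1: the single (top) bit
      have hm1 : m = 1 := by omega
      subst hm1
      rw [show pvBits (1 / 2) = [] from by rw [pvBits]; rfl]
      simp only [List.foldl_nil]
      have hst := stepB_spec a b D N hN (1, 0) (1, 0) ((1 : Nat) % 2 == 1) (peq_refl N _)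
      simp only [show ((1 : Nat) % 2 == 1) = true from rfl, if_true] at hst
      refine ⟨peq_trans hst.1 (peq_of_eq ?_), hst.2⟩
      rw [qmul_one_left]
      rfl
    · -- m ≥ 2: fold the higher bits, then one step for the last bit
      have hrec := IH (m / 2) (by omega) (by omega)
      have hst := stepB_spec a b D N hN _ _ ((m : Nat) % 2 == 1) hrec.1
      refine ⟨peq_trans hst.1 (peq_of_eq ?_), hst.2⟩
      by_cases ho : m % 2 = 1
      · rw [if_pos (by simp [ho]), ← qpow_add,
          show qmul D (a, b) (qpow D (a, b) (m / 2 + m / 2))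
            = qpow D (a, b) (m / 2 + m / 2 + 1) from rfl,
          show m / 2 + m / 2 + 1 = m from by omega]
      · have h0 : m % 2 = 0 := by omega
        rw [if_neg (by simp [h0]), ← qpow_add, show m / 2 + m / 2 = m from by omega]

-- ===== VERDICT (by name: the statement is the Claim_ definition above) =====
theorem power_mod_quadratic_field_spec : Claim_equal_power_mod_quadratic_field := by
  intro a b D n N _hDom hPre
  obtain ⟨hn, hN⟩ := hPre
  unfold Spec_power_mod_quadratic_field power_mod_quadratic_field power_mod_quadratic_field_alt
  rw [if_pos ⟨hn, hN⟩, if_pos ⟨hn, hN⟩]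
  by_cases hm : n.toNat = 0
  · rw [hm, pvQLoopA, pvBits]; simp
  · have hA := qloopA_spec D N hN n.toNat (by omega) 1 0 a b
    have hB := qfoldB_spec a b D N hN n.toNat (by omega)
    have hA1 : PEq N (pvQLoopA D N 1 0 a b n.toNat) (qpow D (a, b) n.toNat) :=
      peq_trans hA.1 (peq_of_eq (qmul_one_left D _))
    refine Prod.ext ?_ ?_
    · rw [← hA.2.1, ← hB.2.1]; exact hA1.1.trans hB.1.1.symm
    · rw [← hA.2.2, ← hB.2.2]; exact hA1.2.trans hB.1.2.symm
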